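-- pv_equiv track=rewrite | github.com/tushartg/Modern-Cryptology | level_3/per_and_shift/permutaions.py | count_rep
-- ===== SOURCE A (Python) =====
-- def count_rep(text):
-- 	arr = text.split()
-- 	count = 0
-- 	dic = {}
-- 	for k in arr:
-- 		try:
-- 			dic[k] += 1
-- 		except:
-- 			dic[k] = 1
-- 	for l in dic:
-- 		if(dic[l] > 1):
-- 			count += dic[l]
-- 	return count
-- ===== SOURCE B (Python) =====
-- def count_rep(text):
--     count = 0
--     dic = {}
--     for k in text.split():
--         v = dic.get(k, 0) + 1
--         dic[k] = v
--         if v == 2: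
--             count += 2
--         elif v > 2:
--             count += 1
--     return count
-- ===== Notes on version B (the rewrite author's own statement) =====
-- stated objective: simpler
-- what changed: Single fused pass: the counter dict and the running total are maintained together (a 1->2 transition adds 2, each further occurrence adds 1), eliminating A's second loop over the dict.
import Mathlib
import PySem

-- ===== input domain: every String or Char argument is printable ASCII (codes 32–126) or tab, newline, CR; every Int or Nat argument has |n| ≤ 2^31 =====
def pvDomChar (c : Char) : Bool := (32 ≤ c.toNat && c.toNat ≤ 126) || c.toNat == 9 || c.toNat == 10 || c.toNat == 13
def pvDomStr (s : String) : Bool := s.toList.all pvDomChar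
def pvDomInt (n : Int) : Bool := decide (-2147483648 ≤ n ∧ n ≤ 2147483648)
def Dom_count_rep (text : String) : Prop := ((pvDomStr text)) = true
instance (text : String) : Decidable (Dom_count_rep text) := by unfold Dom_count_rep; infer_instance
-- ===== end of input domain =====

-- B fuses A's two loops into one pass: the running total is updated from the freshly
-- incremented count (a 1→2 transition adds 2, each later occurrence adds 1), so A's
-- second loop over the dict disappears. Objective: simpler (same asymptotic cost).

-- ===== PORT A =====
def count_rep (text : String) : Int :=
  let arr := PySem.Str.split₀ text
  let dic := arr.foldl (fun d k =>
      match d.get? k with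
      | some v => d.insert k (v + 1)   -- try: dic[k] += 1
      | none   => d.insert k 1) (PySem.Dict.empty : PySem.Dict String Int)   -- except: dic[k] = 1
  -- for l in dic: dic[l] is always present, so the getD default is unreachable
  dic.keys.foldl (fun count l => if dic.getD l 0 > 1 then count + dic.getD l 0 else count) 0

-- ===== PORT B =====
def count_rep_alt (text : String) : Int :=
  let step := fun (st : PySem.Dict String Int × Int) (k : String) =>
    let v := st.1.getD k 0 + 1
    (st.1.insert k v, if v = 2 then st.2 + 2 else if v > 2 then st.2 + 1 else st.2)
  ((PySem.Str.split₀ text).foldl step ((PySem.Dict.empty : PySem.Dict String Int), (0 : Int))).2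

-- ===== PRECONDITION & SPEC =====
def Spec_count_rep (text : String) (out : Int) : Prop := out = count_rep_alt text
instance (text : String) (out : Int) : Decidable (Spec_count_rep text out) := by unfold Spec_count_rep; infer_instance

-- ===== CLAIM (what is proved, stated in full; the proofs are below) =====
def Claim_equal_count_rep : Prop := ∀ (text : String), Dom_count_rep text → Spec_count_rep text (count_rep text)

-- ===== LEMMAS AND PROOFS =====

-- the repeated-word contribution of a word with count n
def pvG (n : Int) : Int := if n > 1 then n else 0

-- the value A computes, as a sum over the distinct words
def pvASum (arr : List String) : Int :=
  ((PySem.Set.ofList arr).map (fun x => pvG ((arr.count x : Int)))).sum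

-- A's building loop step equals the insert-(getD+1) step
theorem pvA_build_step (d : PySem.Dict String Int) (k : String) :
    (match d.get? k with
      | some v => d.insert k (v + 1)
      | none   => d.insert k 1) = d.insert k (d.getD k 0 + 1) := by
  cases h : d.get? k <;> simp [PySem.Dict.getD_eq_get?_getD, h]

theorem pvA_build (arr : List String) :
    (arr.foldl (fun d k =>
      match d.get? k with
      | some v => d.insert k (v + 1)
      | none   => d.insert k 1) (PySem.Dict.empty : PySem.Dict String Int)) = PySem.Dict.counter arr := by
  rw [← PySem.Dict.foldl_insert_getD_add_one_eq_counter]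
  have h : (fun (d : PySem.Dict String Int) (k : String) =>
      match d.get? k with
      | some v => d.insert k (v + 1)
      | none   => d.insert k 1)
      = fun (d : PySem.Dict String Int) (k : String) => d.insert k (d.getD k 0 + 1) := by
    funext d k; exact pvA_build_step d k
  rw [h]

-- fold-to-sum for A's second loop
theorem pvFoldSum (d : PySem.Dict String Int) :
    ∀ (l : List String) (c : Int),
      l.foldl (fun count x => if d.getD x 0 > 1 then count + d.getD x 0 else count) c
        = c + (l.map (fun x => pvG (d.getD x 0))).sum := by
  intro l
  induction l with
  | nil => simp
  | cons a l ih =>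
      intro c
      simp only [List.foldl_cons, List.map_cons, List.sum_cons, ih, pvG]
      split_ifs <;> ring

-- changing a map at the single occurrence of k in a Nodup list
theorem pvSumUpdate (k : String) :
    ∀ (l : List String), l.Nodup → k ∈ l →
      ∀ (f f' : String → Int), (∀ x ∈ l, x ≠ k → f x = f' x) →
      (l.map f).sum = (l.map f').sum + (f k - f' k) := by
  intro l
  induction l with
  | nil => simp
  | cons a l ih =>
      intro hnd hk f f' hag
      rcases List.nodup_cons.mp hnd with ⟨ha, hnd'⟩
      by_cases hak : a = k
      · subst hak
        have : ∀ x ∈ l, f x = f' x := fun x hx =>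
          hag x (List.mem_cons_of_mem _ hx) (fun h => ha (h ▸ hx))
        simp only [List.map_cons, List.sum_cons, List.map_congr_left this]
        ring
      · have hk' : k ∈ l := by
          rcases List.mem_cons.mp hk with h | h
          · exact absurd h.symm hak
          · exact h
        have := ih hnd' hk' f f' (fun x hx hxk => hag x (List.mem_cons_of_mem _ hx) hxk)
        simp only [List.map_cons, List.sum_cons, this,
          hag a List.mem_cons_self hak]
        ring

theorem pvCount_append (arr : List String) (k x : String) :
    (arr ++ [k]).count x = arr.count x + (if x = k then 1 else 0) := by
  by_cases h : x = k
  · subst h; simp [List.count_append]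
  · simp [List.count_append, h, Ne.symm h]

-- appending one word changes the sum by exactly B's increment
theorem pvSum_step (arr : List String) (k : String) :
    pvASum (arr ++ [k])
      = pvASum arr +
        (if ((arr.count k : Int) + 1) = 2 then 2
         else if ((arr.count k : Int) + 1) > 2 then 1 else 0) := by
  unfold pvASum
  by_cases hk : k ∈ arr
  · rw [PySem.Set.ofList_append, PySem.Set.update_cons, PySem.Set.add_of_mem
      (by simpa [PySem.Set.mem_ofList] using hk), PySem.Set.update_nil]
    have hnd := PySem.Set.nodup_ofList arr
    have hmem : k ∈ PySem.Set.ofList arr := (PySem.Set.mem_ofList _ _).mpr hk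
    have hag : ∀ x ∈ PySem.Set.ofList arr, x ≠ k →
        (fun x => pvG (((arr ++ [k]).count x : Int))) x
          = (fun x => pvG ((arr.count x : Int))) x := by
      intro x _ hxk
      simp only [pvCount_append, hxk, if_false]
      simp
    rw [pvSumUpdate k (PySem.Set.ofList arr) hnd hmem
      (fun x => pvG (((arr ++ [k]).count x : Int)))
      (fun x => pvG ((arr.count x : Int))) hag]
    have hc1 : 1 ≤ arr.count k := List.count_pos_iff.mpr hk
    simp only [pvCount_append, pvG]
    push_cast
    split_ifs <;> omega
  · rw [PySem.Set.ofList_append, PySem.Set.update_cons, PySem.Set.add_of_not_mem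
      (by simpa [PySem.Set.mem_ofList] using hk), PySem.Set.update_nil]
    have h0 : arr.count k = 0 := List.count_eq_zero.mpr hk
    rw [List.map_append, List.sum_append]
    have hcong : ∀ x ∈ PySem.Set.ofList arr,
        pvG (((arr ++ [k]).count x : Int)) = pvG ((arr.count x : Int)) := by
      intro x hx
      have hxk : x ≠ k := fun h => hk (h ▸ (PySem.Set.mem_ofList _ _).mp hx)
      rw [pvCount_append]; simp [hxk]
    rw [List.map_congr_left hcong]
    simp [pvG, h0]

-- the invariant of B's fused loop
theorem pvB_inv (arr : List String) :
    arr.foldl (fun (st : PySem.Dict String Int × Int) (k : String) =>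
        let v := st.1.getD k 0 + 1
        (st.1.insert k v, if v = 2 then st.2 + 2 else if v > 2 then st.2 + 1 else st.2))
      (PySem.Dict.empty, 0)
      = (PySem.Dict.counter arr, pvASum arr) := by
  induction arr using List.reverseRecOn with
  | nil => simp [pvASum, PySem.Set.ofList_nil]; rfl
  | append_singleton arr k ih =>
      rw [List.foldl_append, ih]
      simp only [List.foldl_cons, List.foldl_nil]
      rw [pvSum_step]
      refine Prod.ext ?_ ?_
      · show (PySem.Dict.counter arr).insert k ((PySem.Dict.counter arr).getD k 0 + 1)
            = PySem.Dict.counter (arr ++ [k])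
        rw [← PySem.Dict.foldl_insert_getD_add_one_eq_counter,
            ← PySem.Dict.foldl_insert_getD_add_one_eq_counter, List.foldl_append]
        simp
      · simp only [PySem.Dict.getD_counter]
        split_ifs <;> omega

-- ===== VERDICT (by name: the statement is the Claim_ definition above) =====
theorem count_rep_spec : Claim_equal_count_rep := by
  intro text _
  simp only [Spec_count_rep, count_rep, count_rep_alt, pvA_build, pvB_inv]
  rw [pvFoldSum]
  simp [pvASum, pvG, PySem.Dict.keys_counter, PySem.Dict.getD_counter]
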